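-- pv_equiv track=rewrite | github.com/Arx-Game/arxcode | typeclasses/scripts/weekly_events.py | scale_xp
-- ===== SOURCE A (Python) =====
-- def scale_xp(votes):
--     """Helper method for diminishing returns of xp"""
--     xp = 0
--     # 1 vote is 3 xp
--     if votes > 0:
--         xp = 3
--     # 2 votes is 5 xp
--     if votes > 1:
--         xp += 2
--     # 3 to 5 votes is 6 to 8 xp
--     max_range = votes if votes <= 5 else 5
--     for n in range(2, max_range):
--         xp += 1
--
--     def calc_xp(num_votes, start, stop, div):
--         """Helper function for calculating bonus xp"""
--         bonus_votes = num_votes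
--         if stop and (bonus_votes > stop):
--             bonus_votes = stop
--         bonus_xp = bonus_votes - start
--         bonus_xp //= div
--         if (bonus_votes - start) % div:
--             bonus_xp += 1
--         return bonus_xp
--
--     # 1 more xp for each 3 between 6 to 14
--     if votes > 5:
--         xp += calc_xp(votes, 5, 14, 3)
--     # 1 more xp for each 4 votes after 14
--     if votes > 14:
--         xp += calc_xp(votes, 14, 26, 4)
--     # 1 more xp for each 5 votes after 26
--     if votes > 26:
--         xp += calc_xp(votes, 26, 41, 5)
--     # 1 more xp for each 10 votes after 36
--     if votes > 41:
--         xp += calc_xp(votes, 41, None, 10)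
--     return xp
-- ===== SOURCE B (Python) =====
-- # XP award points as an explicit threshold table: xp(votes) counts the vote
-- # numbers at which an extra point is earned, plus the open-ended every-10 tail.
-- _THRESHOLDS = (1, 1, 1, 2, 2, 3, 4, 5, 6, 9, 12, 15, 19, 23, 27, 32, 37)
--
--
-- def scale_xp(votes):
--     """Helper method for diminishing returns of xp"""
--     xp = sum(1 for t in _THRESHOLDS if votes >= t)
--     if votes >= 42:
--         xp += 1 + (votes - 42) // 10
--     return xp
-- ===== Notes on version B (the rewrite author's own statement) =====
-- stated objective: alternative
-- what changed: Replaces A's banded ceiling-division arithmetic (loop over range(2,max_range) plus the clamping calc_xp helper with floor-division and remainder fix-up) with a data-driven formulation: an explicit table of the vote numbers at which an extra point is earned, counted with one membership scan, plus a single floor-division for the open-ended every-10 tail.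
import Mathlib
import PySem

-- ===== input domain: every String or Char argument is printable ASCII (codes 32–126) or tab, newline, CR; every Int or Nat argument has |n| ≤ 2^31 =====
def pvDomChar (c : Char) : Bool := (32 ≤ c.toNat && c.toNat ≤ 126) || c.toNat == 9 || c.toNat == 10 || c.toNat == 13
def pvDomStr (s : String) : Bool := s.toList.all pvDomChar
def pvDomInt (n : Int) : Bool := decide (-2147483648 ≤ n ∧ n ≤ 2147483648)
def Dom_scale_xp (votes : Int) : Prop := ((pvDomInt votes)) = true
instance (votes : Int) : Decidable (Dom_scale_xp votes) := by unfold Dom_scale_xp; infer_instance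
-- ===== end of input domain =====

-- B replaces A's banded ceiling-division arithmetic with an explicit table of the
-- vote numbers that earn a point, counted in one scan, plus one tail division
-- (objective: alternative decomposition; same cost).

-- ===== PORT A =====
-- inner helper calc_xp; 'stop' is Optional[int]; 'if stop and …' tests truthiness (None/0 falsy)
def pvCalcXp (num_votes start : Int) (stop : Option Int) (div : Int) : Int :=
  let bonus_votes := num_votes
  let bonus_votes :=
    match stop with
    | none => bonus_votes
    | some s => if s ≠ 0 ∧ bonus_votes > s then s else bonus_votes
  let bonus_xp := PySem.Int.floordiv (bonus_votes - start) div
  let bonus_xp := if PySem.Int.mod (bonus_votes - start) div ≠ 0 then bonus_xp + 1 else bonus_xp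
  bonus_xp

def scale_xp (votes : Int) : Int :=
  let xp : Int := 0
  let xp := if votes > 0 then 3 else xp
  let xp := if votes > 1 then xp + 2 else xp
  let max_range := if votes ≤ 5 then votes else 5
  let xp := (PySem.List.pyRange 2 max_range 1).foldl (fun a _ => a + 1) xp
  let xp := if votes > 5 then xp + pvCalcXp votes 5 (some 14) 3 else xp
  let xp := if votes > 14 then xp + pvCalcXp votes 14 (some 26) 4 else xp
  let xp := if votes > 26 then xp + pvCalcXp votes 26 (some 41) 5 else xp
  let xp := if votes > 41 then xp + pvCalcXp votes 41 none 10 else xp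
  xp

-- ===== PORT B =====
-- _THRESHOLDS: the vote numbers at which an extra point is earned (finite part)
def pvThresholds : List Int := [1, 1, 1, 2, 2, 3, 4, 5, 6, 9, 12, 15, 19, 23, 27, 32, 37]

def scale_xp_alt (votes : Int) : Int :=
  -- sum(1 for t in _THRESHOLDS if votes >= t)
  let xp := pvThresholds.foldl (fun a t => if votes ≥ t then a + 1 else a) 0
  if votes ≥ 42 then xp + 1 + PySem.Int.floordiv (votes - 42) 10 else xp

-- ===== PRECONDITION & SPEC =====
def Spec_scale_xp (votes : Int) (out : Int) : Prop := out = scale_xp_alt votes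
instance (votes : Int) (out : Int) : Decidable (Spec_scale_xp votes out) := by unfold Spec_scale_xp; infer_instance

-- ===== CLAIM (what is proved, stated in full; the proofs are below) =====
def Claim_equal_scale_xp : Prop := ∀ (votes : Int), Dom_scale_xp votes → Spec_scale_xp votes (scale_xp votes)

-- ===== LEMMAS AND PROOFS =====
theorem pv_foldl_count {α : Type} (l : List α) (init : Int) :
    l.foldl (fun a _ => a + 1) init = init + l.length := by
  induction l generalizing init with
  | nil => simp
  | cons x xs ih => simp [List.foldl, ih]; omega

-- ceiling division: (x + d - 1) / d = x / d (+1 exactly when d does not divide x)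
theorem pv_ceil (x d : Int) (hd : 0 < d) :
    (x + d - 1) / d = x / d + (if x % d = 0 then 0 else 1) := by
  have h1 : x % d = x - d * (x / d) := Int.emod_def x d
  have h2 : 0 ≤ x % d := Int.emod_nonneg x (by omega)
  have h3 : x % d < d := Int.emod_lt_of_pos x hd
  by_cases h : x % d = 0
  · rw [if_pos h]
    have hx : x + d - 1 = (d - 1) + d * (x / d) := by omega
    rw [hx, Int.add_mul_ediv_left _ _ (by omega : d ≠ 0),
      Int.ediv_eq_zero_of_lt (by omega) (by omega)]
    omega
  · rw [if_neg h]
    have hd2 : d * (x / d + 1) = d * (x / d) + d := by ring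
    have hx : x + d - 1 = (x % d - 1) + d * (x / d + 1) := by omega
    rw [hx, Int.add_mul_ediv_left _ _ (by omega : d ≠ 0),
      Int.ediv_eq_zero_of_lt (by omega) (by omega)]
    omega

theorem pvCalc_some (v lo hi d : Int) (hd : 0 < d) (hhi : 0 < hi) (_hlohi : lo < hi)
    (_h : lo < v) : pvCalcXp v lo (some hi) d = (min v hi - lo + d - 1) / d := by
  simp only [pvCalcXp, PySem.Int.mod_eq_emod_of_pos hd,
    PySem.Int.floordiv_eq_ediv_of_pos hd]
  have hmin : (if hi ≠ 0 ∧ v > hi then hi else v) = min v hi := by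
    rw [Int.min_def]; split_ifs <;> omega
  rw [hmin, pv_ceil _ _ hd]
  split_ifs <;> omega

theorem pvCalc_none (v lo d : Int) (hd : 0 < d) (_h : lo < v) :
    pvCalcXp v lo none d = (v - lo + d - 1) / d := by
  simp only [pvCalcXp, PySem.Int.mod_eq_emod_of_pos hd,
    PySem.Int.floordiv_eq_ediv_of_pos hd]
  rw [pv_ceil _ _ hd]
  split_ifs <;> omega

theorem pv_fold_sum (v : Int) (l : List Int) (init : Int) :
    l.foldl (fun a t => if v ≥ t then a + 1 else a) init
      = init + (l.map (fun t => if v ≥ t then (1 : Int) else 0)).sum := by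
  induction l generalizing init with
  | nil => simp
  | cons x xs ih => simp only [List.foldl, List.map, List.sum_cons, ih]; split_ifs <;> omega

-- ===== VERDICT (by name: the statement is the Claim_ definition above) =====
set_option maxHeartbeats 1000000 in
theorem scale_xp_spec : Claim_equal_scale_xp := by
  intro votes _
  unfold Spec_scale_xp scale_xp scale_xp_alt
  simp only [pv_foldl_count, PySem.List.length_pyRange_one, pv_fold_sum, pvThresholds,
    List.map, List.sum_cons, List.sum_nil,
    PySem.Int.floordiv_eq_ediv_of_pos (show (0:Int) < 10 by norm_num)]
  by_cases h5 : votes ≤ 5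
  · rw [if_neg (show ¬ votes > 5 by omega), if_neg (show ¬ votes > 14 by omega),
      if_neg (show ¬ votes > 26 by omega), if_neg (show ¬ votes > 41 by omega),
      if_neg (show ¬ votes ≥ 42 by omega),
      if_neg (show ¬ votes ≥ 6 by omega), if_neg (show ¬ votes ≥ 9 by omega),
      if_neg (show ¬ votes ≥ 12 by omega), if_neg (show ¬ votes ≥ 15 by omega),
      if_neg (show ¬ votes ≥ 19 by omega), if_neg (show ¬ votes ≥ 23 by omega),
      if_neg (show ¬ votes ≥ 27 by omega), if_neg (show ¬ votes ≥ 32 by omega),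
      if_neg (show ¬ votes ≥ 37 by omega)]
    split_ifs <;> omega
  by_cases h14 : votes ≤ 14
  · rw [if_pos (show votes > 0 by omega), if_pos (show votes > 1 by omega),
      if_neg h5, if_pos (show votes > 5 by omega), if_neg (show ¬ votes > 14 by omega),
      if_neg (show ¬ votes > 26 by omega), if_neg (show ¬ votes > 41 by omega),
      if_neg (show ¬ votes ≥ 42 by omega),
      pvCalc_some votes 5 14 3 (by omega) (by omega) (by omega) (by omega),
      if_pos (show votes ≥ 1 by omega), if_pos (show votes ≥ 2 by omega),
      if_pos (show votes ≥ 3 by omega), if_pos (show votes ≥ 4 by omega),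
      if_pos (show votes ≥ 5 by omega),
      if_neg (show ¬ votes ≥ 15 by omega), if_neg (show ¬ votes ≥ 19 by omega),
      if_neg (show ¬ votes ≥ 23 by omega), if_neg (show ¬ votes ≥ 27 by omega),
      if_neg (show ¬ votes ≥ 32 by omega), if_neg (show ¬ votes ≥ 37 by omega)]
    split_ifs <;> omega
  by_cases h26 : votes ≤ 26
  · rw [if_pos (show votes > 0 by omega), if_pos (show votes > 1 by omega),
      if_neg h5, if_pos (show votes > 5 by omega), if_pos (show votes > 14 by omega),
      if_neg (show ¬ votes > 26 by omega), if_neg (show ¬ votes > 41 by omega),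
      if_neg (show ¬ votes ≥ 42 by omega),
      pvCalc_some votes 5 14 3 (by omega) (by omega) (by omega) (by omega),
      pvCalc_some votes 14 26 4 (by omega) (by omega) (by omega) (by omega),
      if_pos (show votes ≥ 1 by omega), if_pos (show votes ≥ 2 by omega),
      if_pos (show votes ≥ 3 by omega), if_pos (show votes ≥ 4 by omega),
      if_pos (show votes ≥ 5 by omega), if_pos (show votes ≥ 6 by omega),
      if_pos (show votes ≥ 9 by omega), if_pos (show votes ≥ 12 by omega),
      if_neg (show ¬ votes ≥ 27 by omega), if_neg (show ¬ votes ≥ 32 by omega),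
      if_neg (show ¬ votes ≥ 37 by omega)]
    split_ifs <;> omega
  by_cases h41 : votes ≤ 41
  · rw [if_pos (show votes > 0 by omega), if_pos (show votes > 1 by omega),
      if_neg h5, if_pos (show votes > 5 by omega), if_pos (show votes > 14 by omega),
      if_pos (show votes > 26 by omega), if_neg (show ¬ votes > 41 by omega),
      if_neg (show ¬ votes ≥ 42 by omega),
      pvCalc_some votes 5 14 3 (by omega) (by omega) (by omega) (by omega),
      pvCalc_some votes 14 26 4 (by omega) (by omega) (by omega) (by omega),
      pvCalc_some votes 26 41 5 (by omega) (by omega) (by omega) (by omega),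
      if_pos (show votes ≥ 1 by omega), if_pos (show votes ≥ 2 by omega),
      if_pos (show votes ≥ 3 by omega), if_pos (show votes ≥ 4 by omega),
      if_pos (show votes ≥ 5 by omega), if_pos (show votes ≥ 6 by omega),
      if_pos (show votes ≥ 9 by omega), if_pos (show votes ≥ 12 by omega),
      if_pos (show votes ≥ 15 by omega), if_pos (show votes ≥ 19 by omega),
      if_pos (show votes ≥ 23 by omega)]
    split_ifs <;> omega
  · rw [if_pos (show votes > 0 by omega), if_pos (show votes > 1 by omega),
      if_neg h5, if_pos (show votes > 5 by omega), if_pos (show votes > 14 by omega),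
      if_pos (show votes > 26 by omega), if_pos (show votes > 41 by omega),
      if_pos (show votes ≥ 42 by omega),
      pvCalc_some votes 5 14 3 (by omega) (by omega) (by omega) (by omega),
      pvCalc_some votes 14 26 4 (by omega) (by omega) (by omega) (by omega),
      pvCalc_some votes 26 41 5 (by omega) (by omega) (by omega) (by omega),
      pvCalc_none votes 41 10 (by omega) (by omega),
      if_pos (show votes ≥ 1 by omega), if_pos (show votes ≥ 2 by omega),
      if_pos (show votes ≥ 3 by omega), if_pos (show votes ≥ 4 by omega),
      if_pos (show votes ≥ 5 by omega), if_pos (show votes ≥ 6 by omega),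
      if_pos (show votes ≥ 9 by omega), if_pos (show votes ≥ 12 by omega),
      if_pos (show votes ≥ 15 by omega), if_pos (show votes ≥ 19 by omega),
      if_pos (show votes ≥ 23 by omega), if_pos (show votes ≥ 27 by omega),
      if_pos (show votes ≥ 32 by omega), if_pos (show votes ≥ 37 by omega)]
    omega
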